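-- pv_equiv track=rewrite | github.com/cargoclaro/glosa | pedimento_ocr_structure.py | format_sections_for_output
-- ===== SOURCE A (Python) =====
-- def format_sections_for_output(sections):
--     """
--     Format the extracted sections for easy reading and processing
--
--     Args:
--         sections (dict): Dictionary with text organized by sections
--
--     Returns:
--         str: Formatted string with sections
--     """
--     output = ["# PEDIMENTO INFORMATION\n"]
--
--     # Define a mapping of current section keys to new display names and their order
--     section_mapping = {
--         "PEDIMENTO": {"name": "sec 1", "order": 1},
--         "Section 1": {"name": "sec 2", "order": 2},
--         "Section 2": {"name": "sec 3", "order": 3},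
--         "Section 3": {"name": "sec 4", "order": 4},  # Will be skipped but included for completeness
--         "Section 4": {"name": "sec 5", "order": 5},
--         "Section 5": {"name": "sec 6", "order": 6},
--         "Section 6": {"name": "sec 7", "order": 7},
--         "Section 7": {"name": "sec 8", "order": 8},
--         "Section 8": {"name": "sec 9", "order": 9}
--     }
--
--     # Create a list of sections with their content and order information
--     formatted_sections = []
--
--     for section_key, section_lines in sections.items():
--         # Skip Section 3 as requested
--         if section_key == "Section 3":
--             continue
--
--         if section_lines:
--             # Get the display name and order for this section
--             if section_key in section_mapping:
--                 display_name = section_mapping[section_key]["name"]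
--                 order = section_mapping[section_key]["order"]
--             else:
--                 # For any sections not in our mapping, use sec + a high number
--                 display_name = f"sec {999}"
--                 order = 999
--
--             section_content = []
--             section_content.append(f"## {display_name}")
--             section_content.append("```")
--
--             # For Section 6, remove content from e.firma onwards
--             if section_key == "Section 6":
--                 filtered_lines = []
--                 for line in section_lines:
--                     if "e.firma:" in line:
--                         # Stop at e.firma line
--                         break
--                     filtered_lines.append(line)
--                 section_content.append("\n".join(filtered_lines))
--             else:
--                 section_content.append("\n".join(section_lines))
--
--             section_content.append("```")
--             section_content.append("")  # Add empty line between sections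
--
--             # Add this section and its order to our list
--             formatted_sections.append({"content": "\n".join(section_content), "order": order})
--
--     # Sort sections by their order and add to output
--     formatted_sections.sort(key=lambda x: x["order"])
--     for section in formatted_sections:
--         output.append(section["content"])
--
--     return "\n".join(output)
-- ===== SOURCE B (Python) =====
-- _ORDERED = [
--     ("PEDIMENTO", "sec 1"),
--     ("Section 1", "sec 2"),
--     ("Section 2", "sec 3"),
--     ("Section 4", "sec 5"),
--     ("Section 5", "sec 6"),
--     ("Section 6", "sec 7"),
--     ("Section 7", "sec 8"),
--     ("Section 8", "sec 9"),
-- ]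
--
--
-- def _block(key, name, lines):
--     if key == "Section 6":
--         body = []
--         for line in lines:
--             if "e.firma:" in line:
--                 break
--             body.append(line)
--     else:
--         body = lines
--     return "\n".join(["## " + name, "```", "\n".join(body), "```", ""])
--
--
-- def format_sections_for_output(sections):
--     out = ["# PEDIMENTO INFORMATION\n"]
--     # mapped sections, driven directly by the mapping's order: no sort needed
--     for key, name in _ORDERED:
--         lines = sections.get(key)
--         if lines:
--             out.append(_block(key, name, lines))
--     # leftover pass: unknown sections keep their insertion order, shown as 'sec 999'
--     mapped = {key for key, _ in _ORDERED} | {"Section 3"}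
--     for key, lines in sections.items():
--         if key not in mapped and lines:
--             out.append(_block(key, "sec 999", lines))
--     return "\n".join(out)
-- ===== Notes on version B (the rewrite author's own statement) =====
-- stated objective: simpler
-- what changed: Instead of collecting blocks tagged with an 'order' field into a list of dicts and sorting it, B walks the section mapping in its defined order appending each present non-empty section's block, then makes one leftover pass over the dict in insertion order for unmapped keys (shown as 'sec 999'), eliminating the sort and the intermediate tagged list.
import Mathlib
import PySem

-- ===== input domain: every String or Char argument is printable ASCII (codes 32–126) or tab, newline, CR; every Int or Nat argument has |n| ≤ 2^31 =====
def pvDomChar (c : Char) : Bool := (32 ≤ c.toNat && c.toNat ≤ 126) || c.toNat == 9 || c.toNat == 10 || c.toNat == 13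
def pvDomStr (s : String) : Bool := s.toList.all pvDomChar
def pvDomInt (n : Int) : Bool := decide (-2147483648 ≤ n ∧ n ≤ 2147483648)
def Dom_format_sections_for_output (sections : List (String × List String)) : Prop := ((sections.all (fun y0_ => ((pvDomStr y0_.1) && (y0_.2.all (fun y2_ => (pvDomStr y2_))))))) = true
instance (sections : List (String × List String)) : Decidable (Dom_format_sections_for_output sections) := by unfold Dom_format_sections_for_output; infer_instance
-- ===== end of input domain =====

-- B replaces A's collect-tag-sort pipeline by an output driven by the mapping's own order
-- (the 8 known section keys, then a leftover pass in insertion order): simpler, no sort.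

-- ===== PORT A =====
def pvSectionMapping : PySem.Dict String (String × Int) := PySem.Dict.mk
  [("PEDIMENTO", ("sec 1", 1)), ("Section 1", ("sec 2", 2)), ("Section 2", ("sec 3", 3)),
   ("Section 3", ("sec 4", 4)), ("Section 4", ("sec 5", 5)), ("Section 5", ("sec 6", 6)),
   ("Section 6", ("sec 7", 7)), ("Section 7", ("sec 8", 8)), ("Section 8", ("sec 9", 9))]

-- the 'for line in section_lines: if "e.firma:" in line: break; filtered_lines.append(line)' loop
def pvFirmaA : List String → List String
  | [] => []
  | line :: rest => if PySem.Str.isIn "e.firma:" line then [] else line :: pvFirmaA rest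

-- one section_content block: ["## name", "```", body, "```", ""] joined by "\n"
def pvBlockA (key name : String) (lines : List String) : String :=
  PySem.Str.join "\n" [PySem.Str.join "" ["## ", name], "```",
    PySem.Str.join "\n" (if key = "Section 6" then pvFirmaA lines else lines), "```", ""]

def format_sections_for_output (sections : List (String × List String)) : String :=
  let formatted : List (String × Int) := sections.foldl (fun acc e =>
    if e.1 = "Section 3" then acc
    else if e.2 ≠ [] then
      (let v := match PySem.Dict.get? pvSectionMapping e.1 with
        | some m => m
        | none => ("sec 999", (999 : Int))
       acc ++ [(pvBlockA e.1 v.1 e.2, v.2)])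
    else acc) []
  let sortedS := PySem.List.sorted formatted (fun x => x.2)
  let output := sortedS.foldl (fun out s => out ++ [s.1]) ["# PEDIMENTO INFORMATION\n"]
  PySem.Str.join "\n" output

-- ===== PORT B =====
def pvOrderedB : List (String × String) :=
  [("PEDIMENTO", "sec 1"), ("Section 1", "sec 2"), ("Section 2", "sec 3"),
   ("Section 4", "sec 5"), ("Section 5", "sec 6"), ("Section 6", "sec 7"),
   ("Section 7", "sec 8"), ("Section 8", "sec 9")]

def pvFirmaB : List String → List String
  | [] => []
  | line :: rest => if PySem.Str.isIn "e.firma:" line then [] else line :: pvFirmaB rest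

def pvBlockB (key name : String) (lines : List String) : String :=
  PySem.Str.join "\n" [PySem.Str.join "" ["## ", name], "```",
    PySem.Str.join "\n" (if key = "Section 6" then pvFirmaB lines else lines), "```", ""]

def pvMappedB : PySem.Set String :=
  PySem.Set.union (PySem.Set.ofList (pvOrderedB.map Prod.fst)) ["Section 3"]

def format_sections_for_output_alt (sections : List (String × List String)) : String :=
  let out1 := pvOrderedB.foldl (fun out kn =>
    match PySem.Dict.get? (PySem.Dict.mk sections) kn.1 with
    | some lines => if lines ≠ [] then out ++ [pvBlockB kn.1 kn.2 lines] else out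
    | none => out) ["# PEDIMENTO INFORMATION\n"]
  let out2 := sections.foldl (fun out e =>
    if PySem.Set.contains pvMappedB e.1 then out
    else if e.2 ≠ [] then out ++ [pvBlockB e.1 "sec 999" e.2]
    else out) out1
  PySem.Str.join "\n" out2

-- ===== PRECONDITION & SPEC =====
-- The Python argument is a dict, so its association-list image always has pairwise-distinct
-- keys; Pre_ states exactly that representation invariant (it excludes no dict input).
def Pre_format_sections_for_output (sections : List (String × List String)) : Prop :=
  (sections.map Prod.fst).Nodup
instance (sections : List (String × List String)) : Decidable (Pre_format_sections_for_output sections) := by unfold Pre_format_sections_for_output; infer_instance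

def pvWitness_format_sections_for_output : (List (String × List String)) :=
  [("Section 6", ["amount 12", "e.firma: SKIP", "tail"]), ("PEDIMENTO", ["head"]), ("Extra", ["z"])]

def Spec_format_sections_for_output (sections : List (String × List String)) (out : String) : Prop := out = format_sections_for_output_alt sections
instance (sections : List (String × List String)) (out : String) : Decidable (Spec_format_sections_for_output sections out) := by unfold Spec_format_sections_for_output; infer_instance

-- ===== CLAIM (what is proved, stated in full; the proofs are below) =====
def Claim_equal_format_sections_for_output : Prop := ∀ (sections : List (String × List String)), Dom_format_sections_for_output sections → Pre_format_sections_for_output sections → Spec_format_sections_for_output sections (format_sections_for_output sections)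

-- ===== LEMMAS AND PROOFS =====

def pvOrd (k : String) : Int :=
  match PySem.Dict.get? pvSectionMapping k with | some m => m.2 | none => 999

def pvName (k : String) : String :=
  match PySem.Dict.get? pvSectionMapping k with | some m => m.1 | none => "sec 999"
def pvF (e : String × List String) : String × Int := (pvBlockA e.1 (pvName e.1) e.2, pvOrd e.1)
def pvPA (e : String × List String) : Bool := (e.1 != "Section 3") && !e.2.isEmpty
def pvG (sections : List (String × List String)) (kn : String × String) :
    Option (String × List String) :=
  match PySem.Dict.get? (PySem.Dict.mk sections) kn.1 with
  | some lines => if lines ≠ [] then some (kn.1, lines) else none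
  | none => none

theorem pvMappedB_eq : pvMappedB = ["PEDIMENTO", "Section 1", "Section 2", "Section 4",
    "Section 5", "Section 6", "Section 7", "Section 8", "Section 3"] := by decide

theorem pvOrd_le (k : String) : pvOrd k ≤ 999 := by
  simp only [pvOrd, pvSectionMapping, PySem.Dict.get?_mk_cons]
  split_ifs <;> simp [PySem.Dict.get?]

theorem pvOrd_lt_iff (k : String) :
    (pvOrd k < 999) ↔ (PySem.Set.contains pvMappedB k = true) := by
  simp only [pvOrd, pvSectionMapping, PySem.Dict.get?_mk_cons, pvMappedB_eq]
  split_ifs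
  all_goals simp only [beq_iff_eq] at *
  all_goals try (subst_vars; decide)
  simp only [PySem.Set.contains, List.contains_eq_mem, PySem.Dict.get?, List.find?_nil,
    Option.map_none, List.mem_cons, List.not_mem_nil, or_false, decide_eq_true_eq]
  constructor
  · intro h; exact absurd h (by norm_num)
  · rintro (rfl|rfl|rfl|rfl|rfl|rfl|rfl|rfl|rfl) <;> exact absurd rfl (by assumption)

theorem pvMapping_none (k : String) (h : PySem.Set.contains pvMappedB k = false) :
    PySem.Dict.get? pvSectionMapping k = none := by
  simp only [pvMappedB_eq, PySem.Set.contains, List.contains_eq_mem, List.mem_cons,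
    List.not_mem_nil, or_false, decide_eq_false_iff_not] at h
  push Not at h
  obtain ⟨h1, h2, h3, h4, h5, h6, h7, h8, h9⟩ := h
  simp only [pvSectionMapping, PySem.Dict.get?_mk_cons, beq_iff_eq]
  split_ifs with g1 g2 g3 g4 g5 g6 g7 g8 g9
  all_goals try (exfalso; subst_vars; simp_all; done)
  simp [PySem.Dict.get?]

theorem pvInsertBy_append {α : Type} (before : α → α → Bool) (x : α) (A B : List α)
    (hB : ∀ y ∈ B, before x y = true) :
    PySem.List.insertBy before x (A ++ B) = PySem.List.insertBy before x A ++ B := by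
  induction A with
  | nil =>
    cases B with
    | nil => rfl
    | cons b B' =>
      simp only [List.nil_append, PySem.List.insertBy]
      rw [hB b (by simp)]
      rfl
  | cons a A' ih =>
    simp only [List.cons_append, PySem.List.insertBy]
    by_cases h : before x a = true
    · simp [h]
    · simp only [Bool.not_eq_true] at h
      simp [h, ih]

theorem pvFirma_eq : ∀ l, pvFirmaB l = pvFirmaA l := by
  intro l
  induction l with
  | nil => rfl
  | cons a t ih => simp only [pvFirmaA, pvFirmaB, ih]

theorem pvBlock_eq (k n : String) (l : List String) : pvBlockB k n l = pvBlockA k n l := by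
  simp only [pvBlockA, pvBlockB, pvFirma_eq]

theorem pvFormattedA (sections : List (String × List String)) :
    sections.foldl (fun acc e =>
      if e.1 = "Section 3" then acc
      else if e.2 ≠ [] then
        (let v := match PySem.Dict.get? pvSectionMapping e.1 with
          | some m => m
          | none => ("sec 999", (999 : Int))
         acc ++ [(pvBlockA e.1 v.1 e.2, v.2)])
      else acc) [] = (sections.filter pvPA).map pvF := by
  have hcong : ∀ (acc : List (String × Int)) (e : String × List String),
      (if e.1 = "Section 3" then acc
       else if e.2 ≠ [] then
        (let v := match PySem.Dict.get? pvSectionMapping e.1 with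
          | some m => m
          | none => ("sec 999", (999 : Int))
         acc ++ [(pvBlockA e.1 v.1 e.2, v.2)])
       else acc)
      = (if pvPA e then acc ++ [pvF e] else acc) := by
    intro acc e
    by_cases h3 : e.1 = "Section 3"
    · simp [h3, pvPA]
    · by_cases he : e.2 = []
      · simp [h3, he, pvPA]
      · simp only [pvPA, pvF, pvName, pvOrd]
        rw [if_neg h3, if_pos (show e.2 ≠ [] from he), if_pos (by simp [h3, he])]
        cases hm : PySem.Dict.get? pvSectionMapping e.1 <;> simp
  calc sections.foldl _ [] = sections.foldl (fun acc e => if pvPA e then acc ++ [pvF e] else acc) [] := by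
        exact PySem.List.foldl_congr_mem _ _ _ _ (fun acc e _ => hcong acc e)
    _ = (sections.filter pvPA).map pvF := by
        simpa using PySem.List.foldl_append_if pvPA pvF sections []

theorem pvFoldl_insertBy_split (key : (String × Int) → Int) (C : Int) :
    ∀ (xs A B : List (String × Int)),
    (∀ x ∈ xs, key x ≤ C) → (∀ a ∈ A, key a < C) → (∀ b ∈ B, key b = C) →
    xs.foldl (fun acc x => PySem.List.insertBy (fun a b => decide (key a < key b)) x acc) (A ++ B)
      = (xs.filter (fun x => key x < C)).foldl
          (fun acc x => PySem.List.insertBy (fun a b => decide (key a < key b)) x acc) A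
        ++ (B ++ xs.filter (fun x => key x = C)) := by
  intro xs
  induction xs with
  | nil => intro A B _ _ _; simp
  | cons x t ih =>
    intro A B hxs hA hB
    have hxC : key x ≤ C := hxs x (by simp)
    rcases lt_or_eq_of_le hxC with hlt | heq
    · have step : PySem.List.insertBy (fun a b => decide (key a < key b)) x (A ++ B)
          = PySem.List.insertBy (fun a b => decide (key a < key b)) x A ++ B := by
        apply pvInsertBy_append
        intro y hy
        simp [hB y hy, hlt]
      simp only [List.foldl_cons, step]
      rw [ih (PySem.List.insertBy _ x A) B (fun z hz => hxs z (by simp [hz]))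
        (by intro a ha
            rcases (PySem.List.mem_insertBy _ x a A).1 ha with rfl | ha'
            · exact hlt
            · exact hA a ha')
        hB]
      have hfl : (List.filter (fun x => decide (key x < C)) (x :: t)) = x :: List.filter (fun x => decide (key x < C)) t := by
        simp [List.filter_cons, hlt]
      have hfe : (List.filter (fun x => decide (key x = C)) (x :: t)) = List.filter (fun x => decide (key x = C)) t := by
        simp [List.filter_cons]; intro h; exact absurd h (by omega)
      simp only [hfl, hfe, List.foldl_cons]
    · have step : PySem.List.insertBy (fun a b => decide (key a < key b)) x (A ++ B)
          = (A ++ B) ++ [x] := by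
        apply PySem.List.insertBy_of_forall_not_before
        intro y hy
        rcases List.mem_append.1 hy with hy | hy
        · simp only [decide_eq_false_iff_not]; have := hA y hy; omega
        · simp only [decide_eq_false_iff_not]; have := hB y hy; omega
      simp only [List.foldl_cons, step]
      rw [List.append_assoc]
      rw [ih A (B ++ [x]) (fun z hz => hxs z (by simp [hz])) hA
        (by intro b hb
            rcases List.mem_append.1 hb with hb | hb
            · exact hB b hb
            · simp at hb; subst hb; omega)]
      have hfl : (List.filter (fun x => decide (key x < C)) (x :: t)) = List.filter (fun x => decide (key x < C)) t := by
        simp [List.filter_cons]; omega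
      have hfe : (List.filter (fun x => decide (key x = C)) (x :: t)) = x :: List.filter (fun x => decide (key x = C)) t := by
        simp [List.filter_cons, heq]
      simp only [hfl, hfe]
      simp

theorem pvSorted_split (xs : List (String × Int)) (hxs : ∀ x ∈ xs, x.2 ≤ 999) :
    PySem.List.sorted xs (fun x => x.2)
      = PySem.List.sorted (xs.filter (fun x => decide (x.2 < 999))) (fun x => x.2)
        ++ xs.filter (fun x => decide (x.2 = 999)) := by
  rw [PySem.List.sorted_eq_foldl_insertBy, PySem.List.sorted_eq_foldl_insertBy]
  have := pvFoldl_insertBy_split (fun x => x.2) 999 xs [] [] hxs (by simp) (by simp)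
  simpa using this

theorem pvFilter_or_perm {α : Type} (p q : α → Bool) :
    ∀ (l : List α), (∀ x ∈ l, ¬(p x = true ∧ q x = true)) →
    (l.filter (fun x => p x || q x)).Perm (l.filter p ++ l.filter q) := by
  intro l
  induction l with
  | nil => intro _; simp
  | cons a t ih =>
    intro h
    have ht := ih (fun x hx => h x (by simp [hx]))
    by_cases hp : p a = true
    · have hq : q a = false := by
        rcases Bool.eq_false_or_eq_true (q a) with h' | h'
        · exact absurd ⟨hp, h'⟩ (h a (by simp))
        · exact h'
      simp only [List.filter_cons, hp, hq, Bool.or_true, Bool.true_or, if_pos, cond_true, cond_false]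
      simpa using ht.cons a
    · simp only [Bool.not_eq_true] at hp
      by_cases hq : q a = true
      · simp only [List.filter_cons, hp, hq]
        simp only [Bool.false_or, cond_true, cond_false]
        exact (ht.cons a).trans List.perm_middle.symm
      · simp only [Bool.not_eq_true] at hq
        simp only [List.filter_cons, hp, hq]
        simpa using ht

theorem pvFilter_key_eq (Q : List String → Bool) :
    ∀ (sections : List (String × List String)),
    (sections.map Prod.fst).Nodup → ∀ (k : String),
    sections.filter (fun e => e.1 == k && Q e.2)
      = (match PySem.Dict.get? (PySem.Dict.mk sections) k with
         | some v => if Q v then [(k, v)] else []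
         | none => []) := by
  intro sections
  induction sections with
  | nil => intro _ k; simp [PySem.Dict.get?]
  | cons a t ih =>
    intro hs k
    have hs' : (t.map Prod.fst).Nodup := by simp at hs; exact hs.2
    have ha : a.1 ∉ t.map Prod.fst := by simp at hs; simpa using hs.1
    by_cases hk : a.1 = k
    · have hget : PySem.Dict.get? (PySem.Dict.mk (a :: t)) k = some a.2 := by
        simp [PySem.Dict.get?, List.find?_cons, hk]
      rw [hget]
      have htnil : t.filter (fun e => e.1 == k && Q e.2) = [] := by
        apply List.filter_eq_nil_iff.2
        intro e he
        subst hk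
        have : e.1 ≠ a.1 := by
          intro hh
          exact ha (hh ▸ (List.mem_map.2 ⟨e, he, rfl⟩))
        simp [this]
      by_cases hQ : Q a.2 = true
      · simp only [List.filter_cons, hk, hQ, beq_self_eq_true, Bool.and_true, htnil, if_pos]
        subst hk
        simp [htnil, hQ]
      · simp only [Bool.not_eq_true] at hQ
        simp [List.filter_cons, hk, hQ, htnil]
    · have hget : PySem.Dict.get? (PySem.Dict.mk (a :: t)) k
          = PySem.Dict.get? (PySem.Dict.mk t) k := by
        simp [PySem.Dict.get?, List.find?_cons, hk]
      rw [hget, ← ih hs' k]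
      simp [List.filter_cons, hk]

theorem pvKey_pass_perm (sections : List (String × List String))
    (hs : (sections.map Prod.fst).Nodup) :
    ∀ (K : List (String × String)), (K.map Prod.fst).Nodup →
    (K.filterMap (pvG sections)).Perm
      (sections.filter (fun e => (K.map Prod.fst).contains e.1 && !e.2.isEmpty)) := by
  intro K
  induction K with
  | nil => intro _; simp
  | cons kn K' ih =>
    intro hK
    have hK' : (K'.map Prod.fst).Nodup := by simp at hK; exact hK.2
    have hkn : kn.1 ∉ K'.map Prod.fst := by simp at hK; simpa using hK.1
    -- head contribution equals the single-key filter
    have hhead : sections.filter (fun e => e.1 == kn.1 && !e.2.isEmpty)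
        = (pvG sections kn).toList := by
      rw [pvFilter_key_eq (fun v => !v.isEmpty) sections hs kn.1]
      unfold pvG
      cases PySem.Dict.get? (PySem.Dict.mk sections) kn.1 with
      | none => simp
      | some lines =>
        by_cases hl : lines = []
        · simp [hl]
        · simp [hl]
    -- the cons filter splits as an or
    have hsplit : sections.filter (fun e => ((kn :: K').map Prod.fst).contains e.1 && !e.2.isEmpty)
        = sections.filter (fun e =>
            ((e.1 == kn.1) && !e.2.isEmpty) || ((K'.map Prod.fst).contains e.1 && !e.2.isEmpty)) := by
      apply List.filter_congr
      intro e _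
      simp only [List.map_cons, List.contains_cons]
      cases h1 : (e.1 == kn.1) <;> cases h2 : (K'.map Prod.fst).contains e.1 <;>
        simp_all [BEq.comm]
    have hdisj : ∀ e ∈ sections,
        ¬(((e.1 == kn.1) && !e.2.isEmpty) = true ∧ ((K'.map Prod.fst).contains e.1 && !e.2.isEmpty) = true) := by
      intro e _ ⟨h1, h2⟩
      simp only [Bool.and_eq_true, beq_iff_eq] at h1 h2
      exact hkn (h1.1 ▸ (by simpa using h2.1))
    have hcons : ((kn :: K').filterMap (pvG sections))
        = (pvG sections kn).toList ++ K'.filterMap (pvG sections) := by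
      cases h : pvG sections kn <;> simp [List.filterMap_cons, h]
    rw [hcons, hsplit, ← hhead]
    exact ((List.Perm.append_left _ (ih hK'))).trans (pvFilter_or_perm _ _ sections hdisj).symm

def pvPred8 (e : String × List String) : Bool :=
  ((pvOrderedB.map Prod.fst).contains e.1) && !e.2.isEmpty
def pvPredU (e : String × List String) : Bool :=
  !(PySem.Set.contains pvMappedB e.1) && !e.2.isEmpty
def pvGB (sections : List (String × List String)) (kn : String × String) : Option String :=
  match PySem.Dict.get? (PySem.Dict.mk sections) kn.1 with
  | some lines => if lines ≠ [] then some (pvBlockB kn.1 kn.2 lines) else none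
  | none => none

theorem pvFoldl_opt {α β : Type} (g : α → Option β) :
    ∀ (l : List α) (acc : List β),
    l.foldl (fun out x => out ++ (g x).toList) acc
      = acc ++ l.filterMap g := by
  intro l
  induction l with
  | nil => intro acc; simp
  | cons a t ih =>
    intro acc
    cases h : g a <;> simp [List.filterMap_cons, h, ih]

theorem pvA_eq (sections : List (String × List String)) :
    format_sections_for_output sections
      = PySem.Str.join "\n" (["# PEDIMENTO INFORMATION\n"]
          ++ (PySem.List.sorted ((sections.filter pvPA).map pvF) (fun x => x.2)).map Prod.fst) := by
  simp only [format_sections_for_output]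
  rw [pvFormattedA, PySem.List.foldl_append_singleton_eq_map]

theorem pvB_eq (sections : List (String × List String)) :
    format_sections_for_output_alt sections
      = PySem.Str.join "\n" ((["# PEDIMENTO INFORMATION\n"]
          ++ pvOrderedB.filterMap (pvGB sections))
          ++ (sections.filter pvPredU).map (fun e => pvBlockB e.1 "sec 999" e.2)) := by
  simp only [format_sections_for_output_alt]
  rw [PySem.List.foldl_congr_mem pvOrderedB _
      (fun out kn => out ++ (pvGB sections kn).toList) _
      (by intro out kn _
          cases hg : PySem.Dict.get? (PySem.Dict.mk sections) kn.1 with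
          | none => simp [pvGB, hg]
          | some lines => by_cases hl : lines = [] <;> simp [pvGB, hg, hl])]
  rw [pvFoldl_opt (pvGB sections) pvOrderedB]
  rw [PySem.List.foldl_congr_mem sections _
      (fun out e => if pvPredU e then out ++ [pvBlockB e.1 "sec 999" e.2] else out) _
      (by intro out e _
          unfold pvPredU
          cases hc : PySem.Set.contains pvMappedB e.1
          · by_cases hl : e.2 = [] <;>
              simp_all [PySem.Set.contains, List.contains_eq_mem]
          · simp_all [PySem.Set.contains, List.contains_eq_mem])]
  rw [PySem.List.foldl_append_if pvPredU (fun e => pvBlockB e.1 "sec 999" e.2)]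

theorem pvContains_iff (x : String) :
    PySem.Set.contains pvMappedB x = true ↔ (x ∈ pvOrderedB.map Prod.fst ∨ x = "Section 3") := by
  simp [pvMappedB_eq, PySem.Set.contains, List.contains_eq_mem, pvOrderedB]
  tauto

theorem pvPred8_eq (e : String × List String) :
    (pvPA e && decide (pvOrd e.1 < 999)) = pvPred8 e := by
  unfold pvPA pvPred8
  by_cases h3 : e.1 = "Section 3"
  · rw [h3]
    simp only [bne_self_eq_false, Bool.false_and, Bool.and_false, Bool.false_and]
    simp
    intro x hx
    have : ∀ p ∈ pvOrderedB, p.1 ≠ "Section 3" := by decide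
    exact absurd rfl (this _ hx)
  · by_cases hm : e.1 ∈ pvOrderedB.map Prod.fst
    · have hlt : pvOrd e.1 < 999 := (pvOrd_lt_iff e.1).2 ((pvContains_iff e.1).2 (Or.inl hm))
      simp [h3, hlt, List.contains_eq_mem, hm]
    · have hnc : PySem.Set.contains pvMappedB e.1 ≠ true := by
        intro hc; rcases (pvContains_iff e.1).1 hc with h | h
        · exact hm h
        · exact h3 h
      have hge : ¬(pvOrd e.1 < 999) := fun hlt => hnc ((pvOrd_lt_iff e.1).1 hlt)
      simp [hge, List.contains_eq_mem, hm]

theorem pvPredU_eq (e : String × List String) :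
    (pvPA e && decide (pvOrd e.1 = 999)) = pvPredU e := by
  unfold pvPA pvPredU
  by_cases hc : PySem.Set.contains pvMappedB e.1 = true
  · have hlt : pvOrd e.1 < 999 := (pvOrd_lt_iff e.1).2 hc
    have hmem : e.1 ∈ pvMappedB := by
      simpa [PySem.Set.contains, List.contains_eq_mem] using hc
    simp [show pvOrd e.1 ≠ 999 by omega]
    intro h
    exact absurd hmem h
  · have hnc : PySem.Set.contains pvMappedB e.1 = false := by
      cases h : PySem.Set.contains pvMappedB e.1
      · rfl
      · exact absurd h hc
    have h3 : e.1 ≠ "Section 3" := by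
      intro h; exact hc ((pvContains_iff e.1).2 (Or.inr h))
    have h999 : pvOrd e.1 = 999 := by
      have hle := pvOrd_le e.1
      have hge : ¬(pvOrd e.1 < 999) := fun hlt => hc ((pvOrd_lt_iff e.1).1 hlt)
      omega
    have hmem : e.1 ∉ pvMappedB := by
      simpa [PySem.Set.contains, List.contains_eq_mem] using hnc
    simp [h3, h999, hmem]

theorem pvG_map_snd (s : List (String × List String)) (kn : String × String)
    (b : String × Int) (hb : (pvG s kn).map pvF = some b) : b.2 = pvOrd kn.1 := by
  unfold pvG at hb
  cases hg : PySem.Dict.get? (PySem.Dict.mk s) kn.1 with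
  | none => rw [hg] at hb; simp at hb
  | some lines =>
    rw [hg] at hb
    by_cases hl : lines = []
    · simp [hl] at hb
    · simp [hl] at hb
      rw [← hb]
      rfl

theorem pvYs_pairwise (s : List (String × List String)) :
    (pvOrderedB.filterMap (fun kn => (pvG s kn).map pvF)).Pairwise (fun a b => a.2 < b.2) := by
  rw [List.pairwise_filterMap]
  have hord : pvOrderedB.Pairwise (fun kn kn' => pvOrd kn.1 < pvOrd kn'.1) := by decide
  exact hord.imp (fun h b hb b' hb' => by
    rw [pvG_map_snd s _ b hb, pvG_map_snd s _ b' hb']; exact h)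

theorem pvSorted_little (s : List (String × List String))
    (hs : (s.map Prod.fst).Nodup) :
    PySem.List.sorted ((s.filter pvPred8).map pvF) (fun x => x.2)
      = pvOrderedB.filterMap (fun kn => (pvG s kn).map pvF) := by
  apply PySem.List.sorted_eq_of_perm_of_pairwise_lt
  · rw [← List.map_filterMap]
    apply List.Perm.map
    exact pvKey_pass_perm s hs pvOrderedB (by decide)
  · exact pvYs_pairwise s

theorem pvLlt (s : List (String × List String)) :
    ((s.filter pvPA).map pvF).filter (fun x => decide (x.2 < 999))
      = (s.filter pvPred8).map pvF := by
  rw [List.filter_map, List.filter_filter]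
  congr 1
  apply List.filter_congr
  intro e _
  rw [Bool.and_comm, ← pvPred8_eq e]; rfl

theorem pvL999 (s : List (String × List String)) :
    ((s.filter pvPA).map pvF).filter (fun x => decide (x.2 = 999))
      = (s.filter pvPredU).map pvF := by
  rw [List.filter_map, List.filter_filter]
  congr 1
  apply List.filter_congr
  intro e _
  rw [Bool.and_comm, ← pvPredU_eq e]; rfl

theorem pvYs_map_fst (s : List (String × List String)) :
    (pvOrderedB.filterMap (fun kn => (pvG s kn).map pvF)).map Prod.fst
      = pvOrderedB.filterMap (pvGB s) := by
  rw [List.map_filterMap]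
  apply List.filterMap_congr
  intro kn hkn
  have hname : pvName kn.1 = kn.2 := by fin_cases hkn <;> decide
  unfold pvG pvGB
  cases hg : PySem.Dict.get? (PySem.Dict.mk s) kn.1 with
  | none => simp
  | some lines =>
    by_cases hl : lines = []
    · simp [hl]
    · simp [hl, pvF, pvBlock_eq, hname]

theorem pvL999_map_fst (s : List (String × List String)) :
    ((s.filter pvPredU).map pvF).map Prod.fst
      = (s.filter pvPredU).map (fun e => pvBlockB e.1 "sec 999" e.2) := by
  rw [List.map_map]
  apply List.map_congr_left
  intro e he
  have hU : pvPredU e = true := List.of_mem_filter he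
  have hnc : PySem.Set.contains pvMappedB e.1 = false := by
    unfold pvPredU at hU
    simp only [Bool.and_eq_true, Bool.not_eq_true'] at hU
    exact hU.1
  have hnone := pvMapping_none e.1 hnc
  simp only [Function.comp, pvF, pvName, hnone, pvBlock_eq]

theorem pvMain (s : List (String × List String)) (hs : (s.map Prod.fst).Nodup) :
    format_sections_for_output s = format_sections_for_output_alt s := by
  rw [pvA_eq, pvB_eq]
  congr 1
  have hbound : ∀ x ∈ (s.filter pvPA).map pvF, x.2 ≤ 999 := by
    intro x hx
    rcases List.mem_map.1 hx with ⟨e, _, rfl⟩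
    exact pvOrd_le e.1
  rw [pvSorted_split _ hbound, List.map_append, pvLlt, pvL999, pvSorted_little s hs,
    pvYs_map_fst, pvL999_map_fst, List.append_assoc]

-- ===== VERDICT (by name: the statement is the Claim_ definition above) =====
theorem format_sections_for_output_spec : Claim_equal_format_sections_for_output := by
  intro sections _ hpre
  unfold Spec_format_sections_for_output
  exact pvMain sections hpre
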